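-- pv_equiv track=rewrite | github.com/Simosnakes/Python_SistemiEReti | Robot/robot.py | matrice_numerata
-- ===== SOURCE A (Python) =====
-- def matrice_numerata(mat):
--     mat_numerata = []
--     numero_cella = 0
--     for riga in mat:
--         nuova_riga = []
--         for cella in riga:
--             if cella != 0:
--                 nuova_riga.append(-1)
--             else:
--                 nuova_riga.append(numero_cella)
--                 numero_cella += 1
--         mat_numerata.append(nuova_riga)
--     return mat_numerata
-- ===== SOURCE B (Python) =====
-- def matrice_numerata(mat):
--     counts = [sum(1 for c in r if c == 0) for r in mat]
--     offsets = [0]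
--     for c in counts[:-1]:
--         offsets.append(offsets[-1] + c)
--     return [_numera_riga(off, r) for off, r in zip(offsets, mat)]
--
-- def _numera_riga(off, riga):
--     out = []
--     for c in riga:
--         if c == 0:
--             out.append(off)
--             off += 1
--         else:
--             out.append(-1)
--     return out
-- ===== Notes on version B (the rewrite author's own statement) =====
-- stated objective: alternative
-- what changed: B replaces A's single stateful sweep (one global counter threaded across rows) by a two-pass decomposition: first compute per-row zero counts and their prefix-sum offsets, then build each row independently numbering its zeros from that row's offset.
import Mathlib
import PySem

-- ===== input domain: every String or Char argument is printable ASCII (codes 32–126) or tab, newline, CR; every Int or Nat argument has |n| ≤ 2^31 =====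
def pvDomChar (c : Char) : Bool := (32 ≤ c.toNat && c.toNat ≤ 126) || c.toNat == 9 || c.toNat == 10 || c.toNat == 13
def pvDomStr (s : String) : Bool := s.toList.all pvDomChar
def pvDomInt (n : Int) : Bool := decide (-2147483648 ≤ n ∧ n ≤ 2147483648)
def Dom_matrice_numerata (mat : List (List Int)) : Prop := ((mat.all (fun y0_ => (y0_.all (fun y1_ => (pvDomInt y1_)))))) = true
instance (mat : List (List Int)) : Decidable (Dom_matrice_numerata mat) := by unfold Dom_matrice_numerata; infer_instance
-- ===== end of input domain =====

-- B replaces A's single global-counter sweep with a two-pass decomposition: per-row zero counts, prefix-sum offsets, then each row numbered independently (objective: alternative, same cost).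

-- ===== PORT A =====
def matrice_numerata (mat : List (List Int)) : List (List Int) :=
  (mat.foldl (fun (st : List (List Int) × Int) riga =>
      let inner := riga.foldl (fun (st2 : List Int × Int) cella =>
          if cella ≠ 0 then (st2.1 ++ [(-1 : Int)], st2.2)
          else (st2.1 ++ [st2.2], st2.2 + 1)) (([] : List Int), st.2)
      (st.1 ++ [inner.1], inner.2)) (([] : List (List Int)), (0 : Int))).1

-- ===== PORT B =====
-- B-side helpers: per-row zero count, prefix-sum offsets, independent row numbering
def pvZeroCount (r : List Int) : Int :=
  ((r.filter (fun c => c == 0)).length : Int)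

def pvOffsets : Int → List Int → List Int
  | _, [] => []
  | acc, c :: rest => acc :: pvOffsets (acc + c) rest

def pvNumRow : Int → List Int → List Int
  | _, [] => []
  | k, c :: rest => if c == 0 then k :: pvNumRow (k + 1) rest else (-1) :: pvNumRow k rest

def matrice_numerata_alt (mat : List (List Int)) : List (List Int) :=
  List.zipWith pvNumRow (pvOffsets 0 (mat.map pvZeroCount)) mat

-- ===== PRECONDITION & SPEC =====
def Spec_matrice_numerata (mat : List (List Int)) (out : List (List Int)) : Prop := out = matrice_numerata_alt mat
instance (mat : List (List Int)) (out : List (List Int)) : Decidable (Spec_matrice_numerata mat out) := by unfold Spec_matrice_numerata; infer_instance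

-- ===== CLAIM (what is proved, stated in full; the proofs are below) =====
def Claim_equal_matrice_numerata : Prop := ∀ (mat : List (List Int)), Dom_matrice_numerata mat → Spec_matrice_numerata mat (matrice_numerata mat)

-- ===== LEMMAS AND PROOFS =====
lemma inner_eq (riga : List Int) : ∀ (acc : List Int) (n : Int),
    riga.foldl (fun (st2 : List Int × Int) cella =>
        if cella ≠ 0 then (st2.1 ++ [(-1 : Int)], st2.2)
        else (st2.1 ++ [st2.2], st2.2 + 1)) (acc, n)
      = (acc ++ pvNumRow n riga, n + pvZeroCount riga) := by
  induction riga with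
  | nil => intro acc n; simp [pvNumRow, pvZeroCount]
  | cons c rest ih =>
    intro acc n
    rw [List.foldl_cons]
    dsimp only
    by_cases hc : c = 0
    · subst hc
      rw [if_neg (by simp), ih]
      simp [pvNumRow, pvZeroCount]
      ring
    · rw [if_pos hc, ih]
      simp [pvNumRow, pvZeroCount, hc]

lemma outer_eq (mat : List (List Int)) : ∀ (acc : List (List Int)) (n : Int),
    (mat.foldl (fun (st : List (List Int) × Int) riga =>
        let inner := riga.foldl (fun (st2 : List Int × Int) cella =>
            if cella ≠ 0 then (st2.1 ++ [(-1 : Int)], st2.2)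
            else (st2.1 ++ [st2.2], st2.2 + 1)) (([] : List Int), st.2)
        (st.1 ++ [inner.1], inner.2)) (acc, n)).1
      = acc ++ List.zipWith pvNumRow (pvOffsets n (mat.map pvZeroCount)) mat := by
  induction mat with
  | nil => intro acc n; simp
  | cons r rest ih =>
    intro acc n
    rw [List.foldl_cons]
    dsimp only
    rw [inner_eq, ih]
    simp [pvOffsets]

-- ===== VERDICT (by name: the statement is the Claim_ definition above) =====
theorem matrice_numerata_spec : Claim_equal_matrice_numerata := by
  intro mat _
  unfold Spec_matrice_numerata matrice_numerata matrice_numerata_alt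
  rw [outer_eq]
  simp
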